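-- pv_equiv track=rewrite | github.com/HarjjotSinghh/leetcode | 2024/December/16_12_2024.py | getFinalState
-- ===== SOURCE A (Python) =====
-- from heapq import heapify, heappop, heappush
-- from typing import List
--
-- def getFinalState(nums: List[int], k: int, multiplier: int):
--     pq = [(val, i) for i, val in enumerate(nums)]
--     heapify(pq)
--     for _ in range(k):
--         _, i = heappop(pq)
--         nums[i] *= multiplier
--         heappush(pq, (nums[i], i))
--     return nums
-- ===== SOURCE B (Python) =====
-- def getFinalState(nums, k, multiplier):
--     # In-place argmin simulation (no heap): k times, scan for the first index
--     # holding the minimum value and multiply it. Mutates nums like A does.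
--     for _ in range(k):
--         best = 0
--         for j in range(1, len(nums)):
--             if nums[j] < nums[best]:
--                 best = j
--         nums[best] *= multiplier
--     return nums
-- ===== Notes on version B (the rewrite author's own statement) =====
-- stated objective: simpler
-- what changed: Replaces the binary heap (heapify/heappop/heappush over (value, index) pairs) by a plain first-argmin scan of nums at each of the k steps, dropping the auxiliary pair list entirely.
import Mathlib
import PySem

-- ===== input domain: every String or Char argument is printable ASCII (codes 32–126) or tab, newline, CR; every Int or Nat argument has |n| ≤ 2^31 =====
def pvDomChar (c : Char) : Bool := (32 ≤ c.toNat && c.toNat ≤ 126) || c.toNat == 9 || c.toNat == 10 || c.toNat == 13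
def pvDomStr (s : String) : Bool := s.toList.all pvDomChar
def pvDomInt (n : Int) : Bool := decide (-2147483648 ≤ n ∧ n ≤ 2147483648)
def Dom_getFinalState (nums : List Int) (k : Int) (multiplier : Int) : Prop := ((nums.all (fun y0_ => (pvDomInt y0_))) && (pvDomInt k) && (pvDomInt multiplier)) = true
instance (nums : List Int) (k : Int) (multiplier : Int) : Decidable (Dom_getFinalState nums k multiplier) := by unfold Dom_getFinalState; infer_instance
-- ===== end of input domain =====

-- B replaces A's binary heap by a plain first-argmin scan per step (simpler, no heap
-- machinery; not faster). Both Pythons mutate `nums` in place the same way and return it;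
-- the equivalence proved here is about the return value.

-- ===== PORT A =====
-- A's `heapq` calls are standard-library calls, ported at their documented contract:
-- `heappop` removes and returns the smallest item of `pq` (Python tuple order =
-- lexicographic; exact because the items carry pairwise distinct indices, so the
-- smallest item is unique and independent of the heap's internal layout),
-- `heappush` adds an item, `heapify` rearranges in place (contents unchanged).
def pvTupLt (a b : Int × Nat) : Bool := a.1 < b.1 || (a.1 == b.1 && decide (a.2 < b.2))

-- smallest item of the priority queue (`heappop`'s choice); none = pop from empty heap
def pvHeapMin? (pq : List (Int × Nat)) : Option (Int × Nat) :=
  pq.foldl (fun acc x => match acc with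
    | none => some x
    | some m => if pvTupLt x m then some x else some m) none

def getFinalStateLoop (multiplier : Int) : Nat → List (Int × Nat) → List Int → List Int
  | 0, _, nums => nums
  | n+1, pq, nums =>
    match pvHeapMin? pq with
    | none => nums   -- heappop of an empty pq: Python raises IndexError (excluded by Pre_)
    | some m =>
      -- `_, i = heappop(pq); nums[i] *= multiplier; heappush(pq, (nums[i], i))`
      let newv := PySem.List.pyGetD nums (m.2 : Int) 0 * multiplier
      getFinalStateLoop multiplier n (pq.erase m ++ [(newv, m.2)])
        (PySem.List.pySetD nums (m.2 : Int) newv)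

def getFinalState (nums : List Int) (k : Int) (multiplier : Int) : List Int :=
  -- pq = [(val, i) for i, val in enumerate(nums)]; heapify(pq) keeps the contents
  getFinalStateLoop multiplier k.toNat nums.zipIdx nums

-- ===== PORT B =====
def getFinalStateStep (nums : List Int) (multiplier : Int) : List Int :=
  -- best = 0; for j in range(1, len(nums)): if nums[j] < nums[best]: best = j
  let best := (PySem.List.pyRange 1 (PySem.List.len nums) 1).foldl
    (fun best j => if PySem.List.pyGetD nums j 0 < PySem.List.pyGetD nums best 0 then j else best)
    (0 : Int)
  PySem.List.pySetD nums best (PySem.List.pyGetD nums best 0 * multiplier)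

def getFinalStateAltLoop (multiplier : Int) : Nat → List Int → List Int
  | 0, nums => nums
  | n+1, nums => getFinalStateAltLoop multiplier n (getFinalStateStep nums multiplier)

def getFinalState_alt (nums : List Int) (k : Int) (multiplier : Int) : List Int :=
  getFinalStateAltLoop multiplier k.toNat nums

-- ===== PRECONDITION & SPEC =====
-- A raises IndexError (heappop from an empty heap) exactly when nums = [] and k ≥ 1;
-- B raises there too. Pre_ excludes only those inputs.
def Pre_getFinalState (nums : List Int) (k : Int) (multiplier : Int) : Prop :=
  nums ≠ [] ∨ k ≤ 0
instance (nums : List Int) (k : Int) (multiplier : Int) : Decidable (Pre_getFinalState nums k multiplier) := by unfold Pre_getFinalState; infer_instance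

def pvWitness_getFinalState : List Int × Int × Int := ([2, 1, 3, 1], 5, 2)

def Spec_getFinalState (nums : List Int) (k : Int) (multiplier : Int) (out : List Int) : Prop := out = getFinalState_alt nums k multiplier
instance (nums : List Int) (k : Int) (multiplier : Int) (out : List Int) : Decidable (Spec_getFinalState nums k multiplier out) := by unfold Spec_getFinalState; infer_instance

-- ===== CLAIM (what is proved, stated in full; the proofs are below) =====
def Claim_equal_getFinalState : Prop := ∀ (nums : List Int) (k : Int) (multiplier : Int), Dom_getFinalState nums k multiplier → Pre_getFinalState nums k multiplier → Spec_getFinalState nums k multiplier (getFinalState nums k multiplier)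

-- ===== LEMMAS AND PROOFS =====

theorem pvTupLt_false_iff (a b : Int × Nat) :
    pvTupLt a b = false ↔ (b.1 < a.1 ∨ (b.1 = a.1 ∧ b.2 ≤ a.2)) := by
  simp [pvTupLt]; omega

theorem pvFold_aux (l : List (Int × Nat)) : ∀ (a : Int × Nat),
    ∃ m, l.foldl (fun acc x => match acc with
      | none => some x
      | some m => if pvTupLt x m then some x else some m) (some a) = some m ∧
      (m = a ∨ m ∈ l) ∧ pvTupLt a m = false ∧ ∀ x ∈ l, pvTupLt x m = false := by
  induction l with
  | nil => intro a; exact ⟨a, rfl, Or.inl rfl, by simp [pvTupLt_false_iff], by simp⟩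
  | cons x xs ih =>
    intro a
    by_cases hx : pvTupLt x a = true
    · obtain ⟨m, h1, h2, h3, h4⟩ := ih x
      refine ⟨m, by simpa [hx] using h1, ?_, ?_, ?_⟩
      · rcases h2 with h|h <;> simp [h]
      · rw [pvTupLt_false_iff] at h3 ⊢
        rw [pvTupLt] at hx; simp at hx; omega
      · intro y hy
        rcases List.mem_cons.mp hy with rfl | hy
        · exact h3
        · exact h4 y hy
    · obtain ⟨m, h1, h2, h3, h4⟩ := ih a
      simp at hx
      refine ⟨m, by simpa [hx] using h1, ?_, h3, ?_⟩
      · rcases h2 with h|h <;> simp [h]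
      · intro y hy
        rcases List.mem_cons.mp hy with rfl | hy
        · rw [pvTupLt_false_iff] at h3 ⊢
          rw [pvTupLt] at hx; simp at hx; omega
        · exact h4 y hy

theorem pvHeapMin?_spec (pq : List (Int × Nat)) (m : Int × Nat)
    (h : pvHeapMin? pq = some m) :
    m ∈ pq ∧ ∀ x ∈ pq, pvTupLt x m = false := by
  match pq with
  | [] => simp [pvHeapMin?] at h
  | a :: l =>
    obtain ⟨m', h1, h2, h3, h4⟩ := pvFold_aux l a
    rw [pvHeapMin?, List.foldl_cons] at h
    rw [h1] at h
    obtain rfl : m' = m := by simpa using h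
    refine ⟨?_, ?_⟩
    · rcases h2 with rfl | hm
      · simp
      · simp [hm]
    · intro y hy
      rcases List.mem_cons.mp hy with rfl | hy
      · exact h3
      · exact h4 y hy

theorem pvHeapMin?_eq_none (pq : List (Int × Nat)) :
    pvHeapMin? pq = none ↔ pq = [] := by
  match pq with
  | [] => simp [pvHeapMin?]
  | a :: l =>
    obtain ⟨m', h1, _, _, _⟩ := pvFold_aux l a
    simp [pvHeapMin?, List.foldl_cons, h1]

theorem pvHeapMin_unique (pq : List (Int × Nat)) (m₁ m₂ : Int × Nat)
    (h₁ : m₁ ∈ pq ∧ ∀ x ∈ pq, pvTupLt x m₁ = false)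
    (h₂ : m₂ ∈ pq ∧ ∀ x ∈ pq, pvTupLt x m₂ = false) : m₁ = m₂ := by
  have a := h₁.2 m₂ h₂.1
  have b := h₂.2 m₁ h₁.1
  rw [pvTupLt_false_iff] at a b
  obtain ⟨x1, y1⟩ := m₁; obtain ⟨x2, y2⟩ := m₂
  simp_all; omega

theorem pvHeapMin?_perm (pq pq' : List (Int × Nat)) (h : pq.Perm pq') :
    pvHeapMin? pq = pvHeapMin? pq' := by
  cases hq : pvHeapMin? pq with
  | none =>
    rw [pvHeapMin?_eq_none] at hq; subst hq
    have h2 : pq' = [] := h.symm.eq_nil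
    subst h2; simp [pvHeapMin?]
  | some m =>
    cases hq' : pvHeapMin? pq' with
    | none =>
      rw [pvHeapMin?_eq_none] at hq'; subst hq'
      have h2 : pq = [] := h.eq_nil
      subst h2; simp [pvHeapMin?] at hq
    | some m' =>
      obtain ⟨a1, a2⟩ := pvHeapMin?_spec pq m hq
      obtain ⟨b1, b2⟩ := pvHeapMin?_spec pq' m' hq'
      have : m = m' := pvHeapMin_unique pq m m'
        ⟨a1, a2⟩ ⟨h.symm.subset b1, fun x hx => b2 x (h.subset hx)⟩
      rw [this]

theorem pvArgmin_aux (nums : List Int) (n : Nat) (h1 : 1 ≤ n) (h2 : n ≤ nums.length) :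
    ∃ b : Nat, ((PySem.List.pyRange 1 (n : Int) 1).foldl
        (fun best j => if PySem.List.pyGetD nums j 0 < PySem.List.pyGetD nums best 0 then j else best)
        (0 : Int)) = (b : Int) ∧
      b < n ∧ (∀ t < n, nums.getD b 0 ≤ nums.getD t 0) ∧
      (∀ t < b, nums.getD b 0 < nums.getD t 0) := by
  induction n with
  | zero => omega
  | succ n ih =>
    by_cases hn : n = 0
    · subst hn
      refine ⟨0, ?_, by omega, ?_, by omega⟩
      · rw [PySem.List.pyRange_one_eq_nil (by norm_num)]; rfl
      · intro t ht; interval_cases t; exact le_refl _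
    · obtain ⟨b, hb1, hb2, hb3, hb4⟩ := ih (by omega) (by omega)
      have hcast : ((n + 1 : Nat) : Int) = (n : Int) + 1 := by push_cast; ring
      rw [hcast, PySem.List.pyRange_one_succ_right (by exact_mod_cast Nat.one_le_iff_ne_zero.mpr hn),
        List.foldl_append, hb1]
      simp only [List.foldl_cons, List.foldl_nil, PySem.List.pyGetD_natCast]
      by_cases hlt : nums.getD n 0 < nums.getD b 0
      · refine ⟨n, by rw [if_pos hlt], by omega, ?_, ?_⟩
        · intro t ht
          rcases Nat.lt_succ_iff_lt_or_eq.mp ht with ht | rfl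
          · exact le_trans (le_of_lt hlt) (hb3 t ht)
          · exact le_refl _
        · intro t ht
          exact lt_of_lt_of_le hlt (hb3 t (by omega))
      · refine ⟨b, by rw [if_neg hlt], by omega, ?_, hb4⟩
        intro t ht
        rcases Nat.lt_succ_iff_lt_or_eq.mp ht with ht | rfl
        · exact hb3 t ht
        · omega

theorem pvGetD_eq (nums : List Int) (b : Nat) (hb : b < nums.length) :
    nums.getD b 0 = nums[b] := by
  rw [List.getD_eq_getElem?_getD, List.getElem?_eq_getElem hb]; rfl

theorem pvMem_zipIdx (nums : List Int) (b : Nat) (hb : b < nums.length) :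
    (nums.getD b 0, b) ∈ nums.zipIdx := by
  have : nums.zipIdx[b]'(by simpa using hb) = (nums.getD b 0, b) := by
    rw [pvGetD_eq nums b hb]; simp [List.getElem_zipIdx]
  exact this ▸ List.getElem_mem _

theorem pvHeapMin?_zipIdx (nums : List Int) (b : Nat) (hb : b < nums.length)
    (hmin : ∀ t < nums.length, nums.getD b 0 ≤ nums.getD t 0)
    (hfirst : ∀ t < b, nums.getD b 0 < nums.getD t 0) :
    pvHeapMin? nums.zipIdx = some (nums.getD b 0, b) := by
  cases hq : pvHeapMin? nums.zipIdx with
  | none =>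
    rw [pvHeapMin?_eq_none] at hq
    have := List.length_zipIdx (l := nums) (i := 0)
    rw [hq] at this; simp at this; omega
  | some m =>
    obtain ⟨h1, h2⟩ := pvHeapMin?_spec _ _ hq
    have hcand : (nums.getD b 0, b) ∈ nums.zipIdx := pvMem_zipIdx nums b hb
    have hprop : ∀ x ∈ nums.zipIdx, pvTupLt x (nums.getD b 0, b) = false := by
      intro x hx
      obtain ⟨t, xv⟩ := x
      obtain ⟨-, ht, hv⟩ := List.mem_zipIdx hx
      simp only [Nat.zero_add] at ht
      rw [pvTupLt_false_iff]
      simp only [Nat.sub_zero] at hv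
      simp only at hv ⊢
      have hle := hmin xv (by omega)
      rw [pvGetD_eq nums xv (by omega)] at hle
      rw [← hv] at hle
      by_cases hxb : xv < b
      · left
        have := hfirst xv hxb
        rw [pvGetD_eq nums xv (by omega)] at this
        omega
      · omega
    congr 1
    exact pvHeapMin_unique _ _ _ ⟨h1, h2⟩ ⟨hcand, hprop⟩

theorem pvErase_zipIdx (nums : List Int) (b : Nat) (hb : b < nums.length) :
    nums.zipIdx.erase (nums.getD b 0, b) = nums.zipIdx.eraseIdx b := by
  apply List.erase_eq_eraseIdx_of_idxOf
  have hmem : (nums.getD b 0, b) ∈ nums.zipIdx := pvMem_zipIdx nums b hb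
  have hlt : List.idxOf (nums.getD b 0, b) nums.zipIdx < nums.zipIdx.length :=
    List.idxOf_lt_length_iff.mpr hmem
  have := List.getElem_idxOf hlt
  rw [List.getElem_zipIdx] at this
  have := congrArg Prod.snd this
  simpa using this

theorem pvZipIdx_set (nums : List Int) (b : Nat) (v : Int) :
    (nums.set b v).zipIdx = nums.zipIdx.set b (v, b) := by
  apply List.ext_getElem
  · simp
  · intro i h1 h2
    simp only [List.getElem_zipIdx, List.getElem_set] at *
    split <;> simp_all

theorem pvLoop_eq (multiplier : Int) (n : Nat) :
    ∀ (pq : List (Int × Nat)) (nums : List Int), nums ≠ [] → pq.Perm nums.zipIdx →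
    getFinalStateLoop multiplier n pq nums = getFinalStateAltLoop multiplier n nums := by
  induction n with
  | zero => intro pq nums _ _; rfl
  | succ n ih =>
    intro pq nums hne hperm
    have hlen : 1 ≤ nums.length := by
      cases nums with | nil => simp at hne | cons a l => simp
    obtain ⟨b, hb1, hb2, hb3, hb4⟩ := pvArgmin_aux nums nums.length hlen le_rfl
    have hmin := pvHeapMin?_zipIdx nums b hb2 hb3 hb4
    have hpq : pvHeapMin? pq = some (nums.getD b 0, b) :=
      (pvHeapMin?_perm _ _ hperm).trans hmin
    have hbest : (PySem.List.pyRange 1 (PySem.List.len nums) 1).foldl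
        (fun best j => if PySem.List.pyGetD nums j 0 < PySem.List.pyGetD nums best 0 then j else best)
        (0 : Int) = (b : Int) := by
      rw [PySem.List.len_eq]; exact hb1
    simp only [getFinalStateLoop, getFinalStateAltLoop, getFinalStateStep, hpq, hbest,
      PySem.List.pyGetD_natCast, PySem.List.pySetD_natCast]
    apply ih
    · intro hcon
      have := congrArg List.length hcon
      simp at this
      exact hne this
    · have e1 : (pq.erase (nums.getD b 0, b)).Perm (nums.zipIdx.eraseIdx b) := by
        rw [← pvErase_zipIdx nums b hb2]
        exact hperm.erase _
      have e2 : ((nums.set b (nums.getD b 0 * multiplier)).zipIdx).Perm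
          ((nums.getD b 0 * multiplier, b) :: nums.zipIdx.eraseIdx b) := by
        rw [pvZipIdx_set]
        exact List.set_perm_cons_eraseIdx (by simpa using hb2) _
      exact ((List.perm_append_singleton ..).trans (e1.cons _)).trans e2.symm

theorem getFinalState_spec' (nums : List Int) (k : Int) (multiplier : Int)
    (h : Pre_getFinalState nums k multiplier) :
    getFinalState nums k multiplier = getFinalState_alt nums k multiplier := by
  rcases h with h | h
  · exact pvLoop_eq multiplier k.toNat nums.zipIdx nums h (List.Perm.refl _)
  · have hk : k.toNat = 0 := by omega
    simp [getFinalState, getFinalState_alt, hk, getFinalStateLoop, getFinalStateAltLoop]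

-- ===== VERDICT (by name: the statement is the Claim_ definition above) =====
theorem getFinalState_spec : Claim_equal_getFinalState := by
  intro nums k multiplier _ hpre
  exact getFinalState_spec' nums k multiplier hpre
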